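-- pv_equiv track=rewrite | github.com/Shunpoco/leetcode | convert-integer-to-the-sum-of-two-no-zero-integers/main.py | hasZero
-- ===== SOURCE A (Python) =====
-- def hasZero(n):
--     if n == 0:
--         return False
--
--     while n > 0:
--         if n % 10 == 0:
--             return False
--
--         n //= 10
--
--     return True
-- ===== SOURCE B (Python) =====
-- def hasZero(n):
--     # no-zero-digit test via the decimal string: n has a zero digit iff '0' occurs in str(n)
--     return '0' not in str(n)
-- ===== Notes on version B (the rewrite author's own statement) =====
-- stated objective: idiomatic
-- what changed: Replaces the arithmetic digit-extraction loop (repeated % 10 and //= 10 with early returns) by a single substring membership test on the decimal string representation.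
-- outside the precondition, e.g. on hasZero(-10): A returns True, B returns False; on hasZero(-3): A returns True, B returns True
import Mathlib
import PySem

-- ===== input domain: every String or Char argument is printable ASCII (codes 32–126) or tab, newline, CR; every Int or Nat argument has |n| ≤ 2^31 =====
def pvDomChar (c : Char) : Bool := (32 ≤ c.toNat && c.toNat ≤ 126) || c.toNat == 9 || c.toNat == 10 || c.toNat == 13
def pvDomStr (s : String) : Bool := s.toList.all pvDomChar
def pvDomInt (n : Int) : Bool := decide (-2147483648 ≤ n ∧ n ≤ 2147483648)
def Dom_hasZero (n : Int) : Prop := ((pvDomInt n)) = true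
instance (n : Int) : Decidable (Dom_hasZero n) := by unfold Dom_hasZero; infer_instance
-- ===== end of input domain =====

-- B replaces A's arithmetic digit-extraction loop by a substring test on the decimal string;
-- Pre_ restricts to nonnegative n (the function's natural domain), see the comment at Pre_hasZero.


-- ===== PORT A =====
-- 'while n > 0: if n % 10 == 0: return False; n //= 10' as structural recursion on n.toNat
def hasZeroLoop (n : Int) : Bool :=
  if h : 0 < n then
    if PySem.Int.mod n 10 == 0 then false
    else hasZeroLoop (PySem.Int.floordiv n 10)
  else true
termination_by n.toNat
decreasing_by
  have h10 : (0:Int) < 10 := by omega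
  have := PySem.Int.mod_nonneg n h10
  have := PySem.Int.mod_lt n h10
  have hq := PySem.Int.floordiv_mul_add_mod n 10
  omega

def hasZero (n : Int) : Bool :=
  if n == 0 then false
  else hasZeroLoop n

-- ===== PORT B =====
def hasZero_alt (n : Int) : Bool :=
  !(PySem.Str.isIn "0" (PySem.Int.toStr n))

-- ===== PRECONDITION & SPEC =====
-- Pre_ excludes negative n, on which A's True (its loop is simply skipped) and B's substring
-- test of the signed decimal string are both accidental out-of-domain behaviours no one would specify.
def Pre_hasZero (n : Int) : Prop := 0 ≤ n
instance (n : Int) : Decidable (Pre_hasZero n) := by unfold Pre_hasZero; infer_instance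
def pvWitness_hasZero : Int := (7)
def Spec_hasZero (n : Int) (out : Bool) : Prop := out = hasZero_alt n
instance (n : Int) (out : Bool) : Decidable (Spec_hasZero n out) := by unfold Spec_hasZero; infer_instance

-- ===== CLAIM (what is proved, stated in full; the proofs are below) =====
def Claim_equal_hasZero : Prop := ∀ (n : Int), Dom_hasZero n → Pre_hasZero n → Spec_hasZero n (hasZero n)

-- ===== LEMMAS AND PROOFS =====

-- proof-side mirror of A's loop on Nat
def natLoop (m : Nat) : Bool :=
  if m = 0 then true
  else if m % 10 = 0 then false
  else natLoop (m / 10)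
decreasing_by exact Nat.div_lt_self (by omega) (by omega)

theorem toDigitsCore_step (b f n : Nat) (ds : List Char) :
    Nat.toDigitsCore b (f + 1) n ds =
      if n / b = 0 then (n % b).digitChar :: ds
      else Nat.toDigitsCore b f (n / b) ((n % b).digitChar :: ds) := by
  rfl

theorem toDigitsCore_append (b : Nat) (f : Nat) : ∀ (n : Nat) (l : List Char),
    Nat.toDigitsCore b f n l = Nat.toDigitsCore b f n [] ++ l := by
  induction f with
  | zero => intro n l; rfl
  | succ f ih =>
    intro n l
    rw [toDigitsCore_step, toDigitsCore_step]
    split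
    · rfl
    · rw [ih (n / b), ih (n / b) [(n % b).digitChar]]
      simp

theorem toDigitsCore_fuel (m : Nat) : ∀ (f : Nat), m < f → ∀ (l : List Char),
    Nat.toDigitsCore 10 f m l = Nat.toDigitsCore 10 (m + 1) m l := by
  induction m using Nat.strong_induction_on with
  | _ m ih =>
    intro f hf l
    obtain ⟨f', rfl⟩ : ∃ f', f = f' + 1 := ⟨f - 1, by omega⟩
    rw [toDigitsCore_step, toDigitsCore_step]
    split
    · rfl
    · rename_i hne
      have hdiv : m / 10 < m := Nat.div_lt_self (by omega) (by omega)
      rw [ih (m / 10) hdiv f' (by omega), ih (m / 10) hdiv m (by omega)]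

theorem toDigits_small (m : Nat) (h : m < 10) : Nat.toDigits 10 m = [m.digitChar] := by
  unfold Nat.toDigits
  rw [toDigitsCore_step]
  simp [Nat.div_eq_of_lt h, Nat.mod_eq_of_lt h]

theorem toDigits_step (m : Nat) (h : 10 ≤ m) :
    Nat.toDigits 10 m = Nat.toDigits 10 (m / 10) ++ [(m % 10).digitChar] := by
  have hne : m / 10 ≠ 0 := by
    have := Nat.le_div_iff_mul_le (k := 10) (by omega) |>.mpr (by omega : 1 * 10 ≤ m)
    omega
  unfold Nat.toDigits
  rw [toDigitsCore_step]
  simp only [hne, if_false]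
  rw [toDigitsCore_fuel (m / 10) m (Nat.div_lt_self (by omega) (by omega)) _,
      toDigitsCore_append]

theorem digitChar_eq_zero_iff (d : Nat) (h : d < 10) : d.digitChar = '0' ↔ d = 0 := by
  interval_cases d <;> simp [Nat.digitChar]

theorem natLoop_eq (m : Nat) (hm : 0 < m) :
    natLoop m = !decide ('0' ∈ Nat.toDigits 10 m) := by
  induction m using Nat.strong_induction_on with
  | _ m ih =>
    rw [natLoop]
    simp only [Nat.pos_iff_ne_zero.mp hm, if_false]
    by_cases hsmall : m < 10
    · rw [toDigits_small m hsmall]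
      have hmod : m % 10 = m := Nat.mod_eq_of_lt hsmall
      have h0 : m.digitChar ≠ '0' := by
        rw [Ne, digitChar_eq_zero_iff m hsmall]; omega
      have h0' : '0' ≠ m.digitChar := Ne.symm h0
      simp [hmod, Nat.pos_iff_ne_zero.mp hm, h0']
      rw [natLoop]
      simp [Nat.div_eq_of_lt hsmall]
    · have hsmall' : 10 ≤ m := by omega
      rw [toDigits_step m hsmall']
      by_cases hz : m % 10 = 0
      · simp [hz, Nat.digitChar]
      · have hd : (m % 10).digitChar ≠ '0' := by
          rw [Ne, digitChar_eq_zero_iff _ (Nat.mod_lt _ (by omega))]; exact hz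
        have hdivpos : 0 < m / 10 := Nat.div_pos hsmall' (by omega)
        rw [if_neg hz, ih (m / 10) (Nat.div_lt_self (by omega) (by omega)) hdivpos]
        have hd' : '0' ≠ (m % 10).digitChar := Ne.symm hd
        simp [hd']

theorem hasZeroLoop_natCast (m : Nat) : hasZeroLoop (m : Int) = natLoop m := by
  induction m using Nat.strong_induction_on with
  | _ m ih =>
    rw [hasZeroLoop, natLoop]
    by_cases hm : m = 0
    · simp [hm]
    · have hpos : (0:Int) < (m:Int) := by exact_mod_cast Nat.pos_of_ne_zero hm
      rw [dif_pos hpos]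
      have hmod : PySem.Int.mod (m:Int) 10 = ((m % 10 : Nat) : Int) := by
        exact_mod_cast PySem.Int.mod_natCast m 10
      have hdiv : PySem.Int.floordiv (m:Int) 10 = ((m / 10 : Nat) : Int) := by
        exact_mod_cast PySem.Int.floordiv_natCast m 10
      rw [hmod, hdiv, ih (m / 10) (Nat.div_lt_self (Nat.pos_of_ne_zero hm) (by omega)),
          if_neg hm]
      by_cases hz : m % 10 = 0
      · have hb : (((m % 10 : Nat) : Int) == 0) = true := by simp [hz]
        rw [hb, if_pos rfl, if_pos hz]
      · have hb : (((m % 10 : Nat) : Int) == 0) = false := by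
          simp only [beq_eq_false_iff_ne, Ne]
          exact_mod_cast hz
        rw [hb, if_neg (by simp), if_neg hz]

theorem mem_iff_singleton_infix {α : Type} (a : α) (l : List α) :
    [a] <:+: l ↔ a ∈ l := by
  constructor
  · intro h; exact h.mem (List.mem_singleton_self a)
  · intro h
    obtain ⟨s, t, rfl⟩ := List.append_of_mem h
    exact ⟨s, t, by simp⟩

theorem hasZero_alt_nonneg (n : Int) (h : 0 ≤ n) :
    hasZero_alt n = !decide ('0' ∈ Nat.toDigits 10 n.toNat) := by
  have hchars : (PySem.Int.toStr n).toList = Nat.toDigits 10 n.toNat := by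
    rw [PySem.Int.toList_toStr]
    unfold PySem.Int.toChars
    rw [if_neg (by omega)]
  have key : PySem.Str.isIn "0" (PySem.Int.toStr n)
      = decide ('0' ∈ Nat.toDigits 10 n.toNat) := by
    rw [Bool.eq_iff_iff, PySem.Str.isIn_iff_infix, decide_eq_true_iff, hchars]
    exact mem_iff_singleton_infix '0' _
  unfold hasZero_alt
  rw [key]

-- ===== VERDICT (by name: the statement is the Claim_ definition above) =====
theorem hasZero_spec : Claim_equal_hasZero := by
  intro n _ hpre
  unfold Spec_hasZero hasZero
  by_cases h0 : n = 0
  · subst h0; decide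
  · have hpos : 0 < n := by
      unfold Pre_hasZero at hpre; omega
    have hne : (n == 0) = false := by simp [h0]
    rw [hne]
    rw [if_neg (by simp)]
    have hcast : (n.toNat : Int) = n := Int.toNat_of_nonneg hpre
    rw [hasZero_alt_nonneg n hpre, ← natLoop_eq n.toNat (by omega), ← hasZeroLoop_natCast, hcast]
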